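-- pv_equiv track=rewrite | github.com/liyijiadou2020/LeetcodeHot150 | Py/meituan/2024-01.py | count_perfect_rectangles
-- ===== SOURCE A (Python) =====
-- def count_perfect_rectangles(matrix):
--     n = len(matrix)
--     perfect_rectangles = [0] * (n + 1)
--
--     # 计算每个位置作为矩形右下角时的完美矩形区域数量
--     for i in range(n):
--         for j in range(n):
--             # 以位置 (i, j) 作为右下角的矩形的大小从1到n
--             for k in range(1, min(n - i, n - j) + 1):
--                 # 计算当前矩形区域内0和1的数量
--                 zeros = ones = 0
--                 for x in range(i, i + k):
--                     for y in range(j, j + k):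
--                         if matrix[x][y] == 0:
--                             zeros += 1
--                         else:
--                             ones += 1
--                 # 如果0和1的数量相等，则该矩形区域是完美的
--                 if zeros == ones:
--                     perfect_rectangles[k] += 1
--
--     return perfect_rectangles
-- ===== SOURCE B (Python) =====
-- def count_perfect_rectangles(matrix):
--     n = len(matrix)
--     # 2D prefix-sum table: P[a][b] = number of nonzero cells in matrix[:a][:b]
--     P = [[0] * (n + 1)]
--     for i in range(n):
--         prev = P[i]
--         cur = [0]
--         for j in range(n):
--             cur.append(cur[j] + prev[j + 1] - prev[j] + (0 if matrix[i][j] == 0 else 1))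
--         P.append(cur)
--     res = [0] * (n + 1)
--     for i in range(n):
--         for j in range(n):
--             for k in range(1, min(n - i, n - j) + 1):
--                 ones = P[i + k][j + k] - P[i][j + k] - P[i + k][j] + P[i][j]
--                 if 2 * ones == k * k:
--                     res[k] += 1
--     return res
-- ===== Notes on version B (the rewrite author's own statement) =====
-- stated objective: faster
-- what changed: B precomputes a 2D prefix-sum table of nonzero cells once, so each k-by-k square's one-count is obtained in O(1) by inclusion-exclusion instead of A's inner double loop that rescans the whole square.
import Mathlib
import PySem

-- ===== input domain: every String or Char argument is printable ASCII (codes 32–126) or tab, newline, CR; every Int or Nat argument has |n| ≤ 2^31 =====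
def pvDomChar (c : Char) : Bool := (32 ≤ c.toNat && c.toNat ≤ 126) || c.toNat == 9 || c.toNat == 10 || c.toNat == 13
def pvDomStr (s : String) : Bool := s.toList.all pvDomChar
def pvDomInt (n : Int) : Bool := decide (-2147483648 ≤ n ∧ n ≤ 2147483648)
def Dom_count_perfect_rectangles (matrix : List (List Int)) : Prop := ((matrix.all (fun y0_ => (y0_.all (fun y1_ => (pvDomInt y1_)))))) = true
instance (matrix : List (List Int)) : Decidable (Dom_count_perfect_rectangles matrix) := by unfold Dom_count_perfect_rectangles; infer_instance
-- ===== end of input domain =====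

-- B replaces A's inner double rescan of every k×k square by a 2D prefix-sum table
-- (one-count in O(1) per square): asymptotically faster, same return value on Pre_.


-- ===== PORT A =====
-- literal transliteration of A: for each top-left (i, j) and size k, rescan the whole
-- k×k square counting zeros and ones, and bump perfect_rectangles[k] when they tie.
-- matrix[x][y] is ported as pyGetD (total form of pyGet?); exact under Pre_ (all indices in range).
def count_perfect_rectangles (matrix : List (List Int)) : List Int :=
  let n : Int := (matrix.length : Int)
  (PySem.List.pyRange 0 n 1).foldl (fun acc i =>
    (PySem.List.pyRange 0 n 1).foldl (fun acc j =>
      (PySem.List.pyRange 1 (min (n - i) (n - j) + 1) 1).foldl (fun acc k =>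
        let zo :=
          (PySem.List.pyRange i (i + k) 1).foldl (fun zo x =>
            (PySem.List.pyRange j (j + k) 1).foldl (fun zo y =>
              if PySem.List.pyGetD (PySem.List.pyGetD matrix x []) y 0 = 0 then
                (zo.1 + 1, zo.2)
              else
                (zo.1, zo.2 + 1)) zo) ((0 : Int), (0 : Int))
        if zo.1 = zo.2 then
          PySem.List.pySetD acc k (PySem.List.pyGetD acc k 0 + 1)
        else acc) acc) acc)
    (List.replicate (matrix.length + 1) 0)

-- ===== PORT B =====
-- transliteration of Source B: build the 2D prefix-sum table P row by row, then read each
-- square's one-count off P by inclusion-exclusion.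
def count_perfect_rectangles_alt (matrix : List (List Int)) : List Int :=
  let n := matrix.length
  let P := (List.range n).foldl (fun P i =>
      let prev := P.getD i []
      let cur := (List.range n).foldl (fun cur j =>
          cur ++ [cur.getD j 0 + prev.getD (j + 1) 0 - prev.getD j 0 +
                  (if (matrix.getD i []).getD j 0 = 0 then 0 else 1)]) [(0 : Int)]
      P ++ [cur]) [List.replicate (n + 1) (0 : Int)]
  (List.range n).foldl (fun res i =>
    (List.range n).foldl (fun res j =>
      (List.range (min (n - i) (n - j))).foldl (fun res k0 =>
        let k := k0 + 1
        let ones := (P.getD (i + k) []).getD (j + k) 0 - (P.getD i []).getD (j + k) 0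
                    - (P.getD (i + k) []).getD j 0 + (P.getD i []).getD j 0
        if 2 * ones = ((k : Int) * (k : Int)) then res.set k (res.getD k 0 + 1) else res) res) res)
    (List.replicate (n + 1) (0 : Int))

-- ===== PRECONDITION & SPEC =====
-- Pre_ excludes exactly the inputs on which the Python A raises IndexError:
-- some row shorter than len(matrix) (A reads matrix[x][y] for all x, y < len(matrix)).
def Pre_count_perfect_rectangles (matrix : List (List Int)) : Prop :=
  ∀ row ∈ matrix, matrix.length ≤ row.length
instance (matrix : List (List Int)) : Decidable (Pre_count_perfect_rectangles matrix) := by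
  unfold Pre_count_perfect_rectangles; infer_instance

def pvWitness_count_perfect_rectangles : List (List Int) := [[1, 0], [0, -3]]

def Spec_count_perfect_rectangles (matrix : List (List Int)) (out : List Int) : Prop :=
  out = count_perfect_rectangles_alt matrix
instance (matrix : List (List Int)) (out : List Int) : Decidable (Spec_count_perfect_rectangles matrix out) := by
  unfold Spec_count_perfect_rectangles; infer_instance

-- ===== CLAIM (what is proved, stated in full; the proofs are below) =====
def Claim_equal_count_perfect_rectangles : Prop :=
  ∀ (matrix : List (List Int)), Dom_count_perfect_rectangles matrix →
    Pre_count_perfect_rectangles matrix →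
    Spec_count_perfect_rectangles matrix (count_perfect_rectangles matrix)

-- ===== LEMMAS AND PROOFS =====

-- the matrix entry at (x, y), totalised with default 0 (what both ports read)
def pvEnt (m : List (List Int)) (x y : Nat) : Int := (m.getD x []).getD y 0
-- 0/1 indicator of a nonzero entry
def pvInd (m : List (List Int)) (x y : Nat) : Int := if pvEnt m x y = 0 then 0 else 1
-- 2D prefix sum: number of nonzero entries in the a×b top-left block
def pvS (m : List (List Int)) (a b : Nat) : Int :=
  ∑ x ∈ Finset.range a, ∑ y ∈ Finset.range b, pvInd m x y
-- one-count / zero-count of the k×k square with top-left (i, j)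
def pvO (m : List (List Int)) (i j k : Nat) : Int :=
  ∑ x ∈ Finset.range k, ∑ y ∈ Finset.range k, pvInd m (i + x) (j + y)
def pvZ (m : List (List Int)) (i j k : Nat) : Int :=
  ∑ x ∈ Finset.range k, ∑ y ∈ Finset.range k, (if pvEnt m (i + x) (j + y) = 0 then (1:Int) else 0)

lemma pvZ_add_pvO (m : List (List Int)) (i j k : Nat) :
    pvZ m i j k + pvO m i j k = (k : Int) * (k : Int) := by
  simp only [pvZ, pvO, pvInd, ← Finset.sum_add_distrib]
  have h : ∀ x ∈ Finset.range k, ∀ y ∈ Finset.range k,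
      ((if pvEnt m (i + x) (j + y) = 0 then (1:Int) else 0) +
       (if pvEnt m (i + x) (j + y) = 0 then (0:Int) else 1)) = 1 := by
    intro x _ y _; split <;> ring
  calc ∑ x ∈ Finset.range k, ∑ y ∈ Finset.range k,
        ((if pvEnt m (i + x) (j + y) = 0 then (1:Int) else 0) +
         (if pvEnt m (i + x) (j + y) = 0 then (0:Int) else 1))
      = ∑ _x ∈ Finset.range k, ∑ _y ∈ Finset.range k, (1:Int) :=
        Finset.sum_congr rfl (fun x hx => Finset.sum_congr rfl (fun y hy => h x hx y hy))
    _ = (k : Int) * (k : Int) := by simp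

-- recurrence the prefix table is built by
lemma pvS_succ_succ (m : List (List Int)) (a b : Nat) :
    pvS m (a + 1) (b + 1) = pvS m (a + 1) b + pvS m a (b + 1) - pvS m a b + pvInd m a b := by
  simp [pvS, Finset.sum_range_succ]; ring

lemma pvS_zero_right (m : List (List Int)) (a : Nat) : pvS m a 0 = 0 := by simp [pvS]
lemma pvS_zero_left (m : List (List Int)) (b : Nat) : pvS m 0 b = 0 := by simp [pvS]

-- inclusion-exclusion: the square's one-count from four prefix sums
lemma pvS_incl_excl (m : List (List Int)) (i j k : Nat) :
    (pvS m (i + k) (j + k) - pvS m i (j + k)) - pvS m (i + k) j + pvS m i j = pvO m i j k := by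
  simp [pvS, pvO, Finset.sum_range_add, Finset.sum_add_distrib]; ring

lemma pyRange_cast (j k : Nat) :
    PySem.List.pyRange (j : Int) ((j : Int) + (k : Int)) 1
      = (List.range k).map (fun t => ((j + t : Nat) : Int)) := by
  rw [PySem.List.pyRange_one]; simp

lemma pyRange_one_cast (M : Nat) :
    PySem.List.pyRange 1 ((M : Int) + 1) 1 = (List.range M).map (fun t => ((t + 1 : Nat) : Int)) := by
  rw [PySem.List.pyRange_one]; simp [add_comm]

-- a zeros/ones tallying loop is a pair of counts
lemma pair_fold {α : Type} (l : List α) (p : α → Prop) [DecidablePred p] (zo : Int × Int) :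
    l.foldl (fun zo y => if p y then (zo.1 + 1, zo.2) else (zo.1, zo.2 + 1)) zo
      = (zo.1 + ((l.countP (fun y => decide (p y)) : Nat) : Int),
         zo.2 + ((l.countP (fun y => !decide (p y)) : Nat) : Int)) := by
  induction l generalizing zo with
  | nil => simp
  | cons h t ih =>
    simp only [List.foldl_cons, List.countP_cons]
    by_cases hp : p h <;> simp [hp, ih] <;> ring_nf

-- A's innermost double loop: zeros and ones counted over the square
lemma pvCountA (m : List (List Int)) (i j k : Nat) :
    (PySem.List.pyRange (i : Int) ((i : Int) + (k : Int)) 1).foldl (fun zo x =>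
      (PySem.List.pyRange (j : Int) ((j : Int) + (k : Int)) 1).foldl (fun zo y =>
        if PySem.List.pyGetD (PySem.List.pyGetD m x []) y 0 = 0 then
          (zo.1 + 1, zo.2)
        else
          (zo.1, zo.2 + 1)) zo) ((0 : Int), (0 : Int))
      = ((k : Int) * (k : Int) - pvO m i j k, pvO m i j k) := by
  rw [pyRange_cast i k, pyRange_cast j k, List.foldl_map]
  have hstep : ∀ (zo : Int × Int), ∀ s ∈ List.range k,
      (List.map (fun t => ((j + t : Nat) : Int)) (List.range k)).foldl (fun zo y =>
        if PySem.List.pyGetD (PySem.List.pyGetD m ((i + s : Nat) : Int) []) y 0 = 0 then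
          (zo.1 + 1, zo.2) else (zo.1, zo.2 + 1)) zo
      = (zo.1 + ((List.range k).countP (fun t => decide (pvEnt m (i+s) (j+t) = 0)) : Int),
         zo.2 + ((List.range k).countP (fun t => !decide (pvEnt m (i+s) (j+t) = 0)) : Int)) := by
    intro zo s _
    rw [List.foldl_map, pair_fold (List.range k)
        (p := fun t => PySem.List.pyGetD (PySem.List.pyGetD m ((i+s : Nat) : Int) []) ((j+t : Nat) : Int) 0 = 0) zo]
    have hd : ∀ t : Nat, decide (PySem.List.pyGetD (PySem.List.pyGetD m ((i+s : Nat) : Int) []) ((j+t : Nat) : Int) 0 = 0)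
        = decide (pvEnt m (i+s) (j+t) = 0) := by
      intro t; rw [decide_eq_decide]; unfold pvEnt
      rw [PySem.List.pyGetD_natCast, PySem.List.pyGetD_natCast]
    simp only [hd]
  rw [PySem.List.foldl_congr_mem _ _ _ _ hstep,
      PySem.List.foldl_prod_mk
        (f := fun a s => a + ((List.range k).countP (fun t => decide (pvEnt m (i+s) (j+t) = 0)) : Int))
        (g := fun a s => a + ((List.range k).countP (fun t => !decide (pvEnt m (i+s) (j+t) = 0)) : Int)),
      PySem.List.foldl_add, PySem.List.foldl_add]
  have hz : ∀ s : Nat, ((List.range k).countP (fun t => decide (pvEnt m (i+s) (j+t) = 0)) : Int)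
      = ∑ t ∈ Finset.range k, (if pvEnt m (i+s) (j+t) = 0 then (1:Int) else 0) := by
    intro s
    rw [← PySem.List.sum_map_ite_one_zero (fun t => decide (pvEnt m (i+s) (j+t) = 0)) (List.range k)]
    simp only [decide_eq_true_eq]
    rfl
  have ho : ∀ s : Nat, ((List.range k).countP (fun t => !decide (pvEnt m (i+s) (j+t) = 0)) : Int)
      = ∑ t ∈ Finset.range k, pvInd m (i+s) (j+t) := by
    intro s
    rw [← PySem.List.sum_map_ite_one_zero (fun t => !decide (pvEnt m (i+s) (j+t) = 0)) (List.range k)]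
    simp only [Bool.not_eq_true', decide_eq_false_iff_not, ite_not, pvInd]
    rfl
  have hzsum : ((List.range k).map (fun s => ((List.range k).countP (fun t => decide (pvEnt m (i+s) (j+t) = 0)) : Int))).sum = pvZ m i j k := by
    simp only [hz]; rfl
  have hosum : ((List.range k).map (fun s => ((List.range k).countP (fun t => !decide (pvEnt m (i+s) (j+t) = 0)) : Int))).sum = pvO m i j k := by
    simp only [ho]; rfl
  rw [hzsum, hosum]
  have h := pvZ_add_pvO m i j k
  refine Prod.ext ?_ ?_ <;> simp <;> linarith

-- one row of B's prefix table
lemma rowB (m : List (List Int)) (a : Nat) (J : Nat) (hJ : J ≤ m.length) :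
    (List.range J).foldl (fun cur j =>
        cur ++ [cur.getD j 0 + ((List.range (m.length + 1)).map (fun b => pvS m a b)).getD (j + 1) 0
                - ((List.range (m.length + 1)).map (fun b => pvS m a b)).getD j 0 +
                (if (m.getD a []).getD j 0 = 0 then 0 else 1)]) [(0 : Int)]
      = (List.range (J + 1)).map (fun b => pvS m (a + 1) b) := by
  induction J with
  | zero => simp [pvS_zero_right]
  | succ J ih =>
    rw [List.range_succ (n := J), List.foldl_append, ih (by omega), List.foldl_cons, List.foldl_nil]
    rw [List.getD_eq_getElem?_getD, List.getElem?_map, List.getElem?_range (by omega)]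
    rw [PySem.List.getD_map_range _ _ _ _ (by omega), PySem.List.getD_map_range _ _ _ _ (by omega)]
    have h : (if (m.getD a []).getD J 0 = 0 then (0:Int) else 1) = pvInd m a J := rfl
    rw [h]
    rw [List.range_succ (n := J + 1), List.map_append]
    simp [pvS_succ_succ m a J]

-- B's prefix table is the table of pvS values
lemma pvTableB (m : List (List Int)) :
    (List.range m.length).foldl (fun P i =>
      let prev := P.getD i []
      let cur := (List.range m.length).foldl (fun cur j =>
          cur ++ [cur.getD j 0 + prev.getD (j + 1) 0 - prev.getD j 0 +
                  (if (m.getD i []).getD j 0 = 0 then 0 else 1)]) [(0 : Int)]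
      P ++ [cur]) [List.replicate (m.length + 1) (0 : Int)]
      = (List.range (m.length + 1)).map (fun a =>
          (List.range (m.length + 1)).map (fun b => pvS m a b)) := by
  have base : [List.replicate (m.length + 1) (0 : Int)]
      = (List.range 1).map (fun a => (List.range (m.length + 1)).map (fun b => pvS m a b)) := by
    simp [pvS_zero_left, List.map_const']
  have main : ∀ I : Nat, I ≤ m.length →
      (List.range I).foldl (fun P i =>
        let prev := P.getD i []
        let cur := (List.range m.length).foldl (fun cur j =>
            cur ++ [cur.getD j 0 + prev.getD (j + 1) 0 - prev.getD j 0 +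
                    (if (m.getD i []).getD j 0 = 0 then 0 else 1)]) [(0 : Int)]
        P ++ [cur]) [List.replicate (m.length + 1) (0 : Int)]
      = (List.range (I + 1)).map (fun a => (List.range (m.length + 1)).map (fun b => pvS m a b)) := by
    intro I
    induction I with
    | zero => intro _; exact base
    | succ I ih =>
      intro hI
      rw [List.range_succ (n := I), List.foldl_append, ih (by omega), List.foldl_cons, List.foldl_nil]
      have hprev : ((List.range (I + 1)).map (fun a => (List.range (m.length + 1)).map (fun b => pvS m a b))).getD I []
          = (List.range (m.length + 1)).map (fun b => pvS m I b) :=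
        PySem.List.getD_map_range _ _ _ _ (by omega)
      simp only [hprev]
      rw [rowB m I m.length le_rfl]
      rw [List.range_succ (n := I + 1), List.map_append]
      rfl
  exact main m.length le_rfl

-- the two ports agree (unconditionally: both read out-of-range cells as the default 0)
lemma ports_eq (m : List (List Int)) :
    count_perfect_rectangles m = count_perfect_rectangles_alt m := by
  simp only [count_perfect_rectangles, count_perfect_rectangles_alt]
  rw [pvTableB m]
  rw [PySem.List.pyRange_zero_natCast]
  simp only [List.foldl_map]
  refine PySem.List.foldl_congr_mem _ _ _ _ ?_
  intro acc i hi
  rw [List.mem_range] at hi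
  refine PySem.List.foldl_congr_mem _ _ _ _ ?_
  intro acc j hj
  rw [List.mem_range] at hj
  have hmin : min ((m.length : Int) - (i : Int)) ((m.length : Int) - (j : Int)) + 1
      = ((min (m.length - i) (m.length - j) : Nat) : Int) + 1 := by
    push_cast [Nat.cast_sub hi.le, Nat.cast_sub hj.le]
    ring
  rw [hmin, pyRange_one_cast, List.foldl_map]
  refine PySem.List.foldl_congr_mem _ _ _ _ ?_
  intro acc t ht
  rw [List.mem_range] at ht
  rw [pvCountA m i j (t + 1)]
  have h1 : i + (t + 1) < m.length + 1 := by omega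
  have h2 : j + (t + 1) < m.length + 1 := by omega
  rw [PySem.List.getD_map_range _ _ _ _ h1, PySem.List.getD_map_range _ _ _ _ (by omega : i < m.length + 1)]
  rw [PySem.List.getD_map_range _ _ _ _ h2, PySem.List.getD_map_range _ _ _ _ h2,
      PySem.List.getD_map_range _ _ _ _ (by omega : j < m.length + 1),
      PySem.List.getD_map_range _ _ _ _ (by omega : j < m.length + 1)]
  rw [pvS_incl_excl m i j (t + 1)]
  have hiff : (((t + 1 : Nat) : Int) * ((t + 1 : Nat) : Int) - pvO m i j (t + 1) = pvO m i j (t + 1))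
      ↔ (2 * pvO m i j (t + 1) = ((t + 1 : Nat) : Int) * ((t + 1 : Nat) : Int)) := by
    omega
  simp only [PySem.List.pySetD_natCast, PySem.List.pyGetD_natCast]
  exact if_congr hiff rfl rfl

-- ===== VERDICT (by name: the statement is the Claim_ definition above) =====
theorem count_perfect_rectangles_spec : Claim_equal_count_perfect_rectangles := by
  intro m _ _
  unfold Spec_count_perfect_rectangles
  exact ports_eq m
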